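/- GENERATED by tools/from_farm_form.py from prooffarm-gif/accepted/DGifSlurp.4/Lemmas.lean (a worked proof of the farm's unit `DGifSlurp.4`,
   accepted by the verdict) — do not edit. -/
import Gif.Spec.Units.DGifSlurp_4
import Gif.Spec.AllSegs

/-!
  Lemmas for the unit `DGifSlurp.4` (segment 4 of `DGifSlurp`, dgif_lib.c:1207-1214): the segment is walked in TWO STEPS that meet at
  10A914H (`mov rdi, rbp` in front of the call of DGifDecreaseImageCounter), with a private assertion there.

      seg4_failAddr    the address 10A914H, relative to the label `ret23`
      seg4_Fail        the assertion at 10A914H: `At` + the last counted image (without extension list)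
      seg4_slot_toNat, seg4_slot_add8            `&SavedImages[ImageCount - 1]` as the walker computes it
      seg4_sdiv_toNat, seg4_fits, seg4_div_some  `idiv ecx` of `0:7FFFFFFFH` by a positive `int`
      seg4_pos, seg4_size, seg4_nofault          the three range tests as numbers
      seg4_at_carry    `At` over the one stack store of the segment (the return address of a check call)
      seg4_head        10A70BH … 10A777H | 10A914H: `IM` → `Sized` ∨ `seg4_Fail`
      seg4_tail        10A914H … the call of DGifDecreaseImageCounter … 10A8EDH: `seg4_Fail` → `Exit`
-/

open X86 X86.User Asan ProgX.Base ProgX.Base.Spec Gif.Spec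

set_option maxRecDepth 4000
set_option maxHeartbeats 4000000

namespace Gif.Spec.DGifSlurp_4

/-- The address of the failure arm 10A914H (`mov rdi, rbp`, 3 bytes, and the 5-byte `call` in front of the return address `ret23`;
dgif_lib.c:1213). -/
abbrev seg4_failAddr : Word := Gif.L.DGifSlurp.ret23 - 8

/-- **A RANGE TEST FAILED** (10A914H `mov rdi, rbp`, l.1213, in front of `DGifDecreaseImageCounter(GifFile)`): `At` for the heap and
forest of DGifGetImageDesc's post, and the last counted image (no extension list: EX3; the images before it complete). -/
structure seg4_Fail (H : Heap) (rest : List Obj) (frames : List (Nat × FrameLayout)) (F : Forest) (R : Rd) (Hc : Heap) (Fc : Forest)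
    (u₀ e : State) (ret : Word) (v : State) : Prop where
  at_ : DGifSlurp.At seg4_failAddr H rest frames F R Hc Fc u₀ e ret v
  last : ∃ (s : Saved) (init : List Img) (g : Img), DGifSlurp.Last Fc s init g

/-- The address of the last counted slot, `&SavedImages[ImageCount - 1]`, as the walker computes it (`movsxd ; lea rax, [rdx * 8] ;
sub rax, rdx ; lea r12, [rbx + rax * 8 - 38H]`), as a number. -/
theorem seg4_slot_toNat (a n : Nat) (h1 : a + 56 * (n + 1) ≤ 0xC00000) :
    (UInt64.ofNat a + (UInt64.ofNat (n + 1) * 8 - UInt64.ofNat (n + 1)) * 8 - 56).toNat = a + 56 * n := by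
  u_omega

/-- `lea rdi, [r12 + 8]` as the walker folds it. -/
theorem seg4_slot_add8 (x : Word) : x - 48 = x - 56 + 8 := by
  bv_decide

/-- The 64-bit signed quotient of `7FFFFFFFH` by a positive `int`, as a number. -/
theorem seg4_sdiv_toNat (d : BitVec 32) (hm : d.msb = false) :
    ((2147483647#64).sdiv (BitVec.signExtend 64 d)).toNat = 2147483647 / d.toNat := by
  have hD : BitVec.signExtend 64 d = BitVec.setWidth 64 d := BitVec.signExtend_eq_setWidth_of_msb_false hm
  have hDm : (BitVec.setWidth 64 d).msb = false := by
    bv_decide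
  have hXm : (2147483647#64).msb = false := by decide
  have hDn : (BitVec.setWidth 64 d).toNat = d.toNat := by
    rw [BitVec.toNat_setWidth]
    have := d.isLt
    omega
  rw [hD, BitVec.sdiv_eq, hXm, hDm]
  simp only [BitVec.udiv_eq]
  rw [BitVec.toNat_udiv, hDn]
  rfl

/-- A 64-bit value below `2^31` is the sign extension of its low half (the quotient of `idiv r32` fits). -/
theorem seg4_fits (Q : BitVec 64) (h : Q.toNat < 2 ^ 31) : ((Q.setWidth 32).signExtend 64 != Q) = false := by
  have hlt : BitVec.ult Q 2147483648#64 = true := by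
    simp only [BitVec.ult, BitVec.toNat_ofNat, decide_eq_true_eq]
    omega
  bv_decide

/-- **`idiv ecx` of `edx:eax = 0:7FFFFFFFH` by a positive `int`** (dgif_lib.c:1212 `INT_MAX / Height`): no `#DE`, and the quotient is
`2147483647 / Height`. -/
theorem seg4_div_some (d : BitVec 32) (h0 : d ≠ 0#32) (hm : d.msb = false) :
    ∃ qr : BitVec 32 × BitVec 32, Alu.div true (0#32) (2147483647#32) d = some qr ∧ qr.1.toNat = 2147483647 / d.toNat := by
  unfold Alu.div
  have e0 : (d == 0) = false := by
    simp only [beq_eq_false_iff_ne, ne_eq]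
    exact h0
  have hX : (0#32 ++ 2147483647#32 : BitVec (32 + 32)) = 2147483647#64 := by decide
  simp only [e0, Bool.false_eq_true, if_false, if_true, hX]
  have hQn := seg4_sdiv_toNat d hm
  generalize (2147483647#64).sdiv (BitVec.signExtend 64 d) = Q at hQn
  have hd1 : 1 ≤ d.toNat := by
    have : d.toNat ≠ 0 := by
      intro h
      apply h0
      exact BitVec.eq_of_toNat_eq h
    omega
  have hq31 : Q.toNat < 2 ^ 31 := by
    rw [hQn]
    have := Nat.div_le_self 2147483647 d.toNat
    omega
  have hfit := seg4_fits Q hq31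
  have hfit' : (BitVec.signExtend (32 + 32) (BitVec.setWidth 32 Q) != Q) = false := hfit
  rw [hfit']
  simp only [Bool.false_eq_true, if_false]
  refine ⟨_, rfl, ?_⟩
  show (BitVec.setWidth 32 Q).toNat = _
  rw [BitVec.toNat_setWidth, ← hQn]
  omega

/-- **What `test r32, r32 ; jle` NOT TAKEN says of a loaded `int`** (dgif_lib.c:1209 `Width > 0`, `Height > 0`): it is at least 1 and
below `2^31`; its 32-bit vector is not 0 and not negative. -/
theorem seg4_pos (W : Nat) (hW : W < 2 ^ 32) (h1 : ¬(W % 4294967296 = 0 ∨ (BitVec.ofNat 32 W).msb = true)) :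
    1 ≤ W ∧ W < 2 ^ 31 ∧ BitVec.ofNat 32 W ≠ 0#32 ∧ (BitVec.ofNat 32 W).msb = false ∧ (BitVec.ofNat 32 W).toNat = W := by
  have hn : (BitVec.ofNat 32 W).toNat = W := toNat_ofNat32 W hW
  have hm : (BitVec.ofNat 32 W).msb = false := by
    cases hb : (BitVec.ofNat 32 W).msb
    · rfl
    · exact absurd (Or.inr hb) h1
  have hm' := hm
  rw [BitVec.msb_eq_decide, hn] at hm'
  simp only [decide_eq_false_iff_not, Nat.not_le] at hm'
  have h0 : W % 4294967296 ≠ 0 := fun h => h1 (Or.inl h)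
  refine ⟨by omega, by omega, ?_, hm, hn⟩
  intro h
  have := congrArg BitVec.toNat h
  rw [hn] at this
  simp only [BitVec.toNat_ofNat] at this
  omega

/-- **THE THREE RANGE TESTS** (dgif_lib.c:1209-1212): `Width > 0`, `Height > 0` as `int`s, `idiv` did not fault and
`Width ≤ INT_MAX / Height` (`cmp ebx, eax ; jg` not taken): the product is an `int`. -/
theorem seg4_size (W Hh : Nat) (hW : W < 2 ^ 32) (hH : Hh < 2 ^ 32)
    (h1 : ¬(W % 4294967296 = 0 ∨ (BitVec.ofNat 32 W).msb = true))
    (h2 : ¬(Hh % 4294967296 = 0 ∨ (BitVec.ofNat 32 Hh).msb = true))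
    (qr : BitVec 32 × BitVec 32) (hopt : Alu.div true (0#32) (2147483647#32) (BitVec.ofNat 32 Hh) = some qr)
    (h3 : ¬ qr.fst.toInt < (BitVec.ofNat 32 W).toInt) : W * Hh < 2 ^ 31 := by
  obtain ⟨hw1, hw31, _, _, hwn⟩ := seg4_pos W hW h1
  obtain ⟨hh1, hh31, hh0, hhm, hhn⟩ := seg4_pos Hh hH h2
  obtain ⟨qr', e, hq⟩ := seg4_div_some (BitVec.ofNat 32 Hh) hh0 hhm
  rw [hopt] at e
  have e' : qr = qr' := Option.some.inj e
  rw [← e', hhn] at hq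
  have hq31 : qr.fst.toNat < 2 ^ 31 := by
    rw [hq]
    have := Nat.div_le_self 2147483647 Hh
    omega
  rw [toInt_of_lt _ hq31, toInt_of_lt _ (by omega), hwn, hq] at h3
  have hle : W ≤ 2147483647 / Hh := by omega
  have := (Nat.le_div_iff_mul_le (by omega : 0 < Hh)).mp hle
  omega

/-- **`idiv ecx` does not fault** behind the two tests. -/
theorem seg4_nofault (Hh : Nat) (hH : Hh < 2 ^ 32) (h2 : ¬(Hh % 4294967296 = 0 ∨ (BitVec.ofNat 32 Hh).msb = true))
    (hopt : Alu.div true (0#32) (2147483647#32) (BitVec.ofNat 32 Hh) = none) : False := by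
  obtain ⟨_, _, hh0, hhm, _⟩ := seg4_pos Hh hH h2
  obtain ⟨qr', e, _⟩ := seg4_div_some (BitVec.ofNat 32 Hh) hh0 hhm
  rw [hopt] at e
  exact absurd e (by simp only [reduceCtorEq, not_false_eq_true])


/-- **`At` OVER THE ONE STACK STORE OF THE SEGMENT** (the return address a check call pushes at `RA - 160`): every clause of `At` is
kept, and the reader's measure. -/
theorem seg4_at_carry (Lay : Layout) (hLay : Lay.hi = 0x1000000) {cut cut' : Word} {H : Heap} {rest : List Obj} {frames : List (Nat × FrameLayout)} {F : Forest} {R : Rd}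
    {Hc : Heap} {Fc : Forest} {u₀ e : State} {ret : Word} {v s : State} (val : Nat)
    (hA : DGifSlurp.At cut H rest frames F R Hc Fc u₀ e ret v)
    (hrip : s.rip = cut') (hrsp : s.reg .rsp = e.reg .rsp - 152) (hrbp : s.reg .rbp = v.reg .rbp)
    (hr14 : s.reg .r14 = v.reg .r14) (hmem : s.mem = v.mem.writeLE (e.reg .rsp - 160) 8 val)
    (hcode : (conv u₀).code.In s.mem) (habi : (conv u₀).inv s) :
    DGifSlurp.At cut' H rest frames F R Hc Fc u₀ e ret s ∧ rem R s.mem = rem R v.mem := by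
  obtain ⟨hcore, hreg, hgif, hpv, hinv, hok⟩ := hA
  have he := hcore.entry
  v_entry he
  obtain ⟨henv, hrdi, hcomp⟩ := hcore.pre
  have hcur := henv.ctx.cursor_range henv.heap.inv.shadow
  clear he_align
  have k_r15 : v.mem.readLE (e.reg .rsp - 8) 8 = (e.reg .r15).toNat := hcore.slot_r15
  have k_r14 : v.mem.readLE (e.reg .rsp - 16) 8 = (e.reg .r14).toNat := hcore.slot_r14
  have k_r13 : v.mem.readLE (e.reg .rsp - 24) 8 = (e.reg .r13).toNat := hcore.slot_r13
  have k_r12 : v.mem.readLE (e.reg .rsp - 32) 8 = (e.reg .r12).toNat := hcore.slot_r12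
  have k_rbp : v.mem.readLE (e.reg .rsp - 40) 8 = (e.reg .rbp).toNat := hcore.slot_rbp
  have k_rbx : v.mem.readLE (e.reg .rsp - 48) 8 = (e.reg .rbx).toNat := hcore.slot_rbx
  have k_ra : UInt64.ofNat (v.mem.readLE (e.reg .rsp) 8) = ret := hcore.slot_ra
  have hsame : Mem.SameExcept
    [⟨(e.reg .rsp).toNat - 848, (e.reg .rsp).toNat⟩,
     shadowSpan ((e.reg .rsp).toNat - 152) ((e.reg .rsp).toNat - 56),
     ⟨0x800000, 0x1000020⟩,
     ⟨R.cur, R.cur + 8⟩] e.mem v.mem := hcore.same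
  -- the store keeps the heap's invariant, the state invariant and the measure
  obtain ⟨hinvA, hokA, hremA⟩ := store_stack hinv hok ⟨hcur.1, hcur.2.1⟩ (e.reg .rsp - 160) 8 val
    (by u_omega) (by u_omega)
  rw [← hmem] at hinvA hokA hremA
  refine ⟨?_, hremA⟩
  exact {
    core := {
      entry := hcore.entry
      pre := hcore.pre
      rip := hrip
      rsp := hrsp
      rbp := hrbp.trans hcore.rbp
      r14 := hr14.trans hcore.r14
      slot_r15 := by
        rw [hmem]
        u_frame k_r15
      slot_r14 := by
        rw [hmem]
        u_frame k_r14
      slot_r13 := by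
        rw [hmem]
        u_frame k_r13
      slot_r12 := by
        rw [hmem]
        u_frame k_r12
      slot_rbp := by
        rw [hmem]
        u_frame k_rbp
      slot_rbx := by
        rw [hmem]
        u_frame k_rbx
      slot_ra := by
        rw [hmem]
        u_frame k_ra
      rem := by
        rw [hremA]
        exact hcore.rem
      same := by
        rw [hmem]
        u_same
      code := hcode
      abi := habi
    }
    region := hreg
    gif := hgif
    pv := hpv
    inv := hinvA
    ok := hokA
  }

/-- **10A70BH … 10A777H | 10A914H** (dgif_lib.c:1207-1212): the checked loads of `gif.SavedImages` and `gif.ImageCount`,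
`r12 = &SavedImages[ImageCount - 1]`, the checked loads of `sp->ImageDesc.Width` / `->Height`, the three range tests. All pass:
`Sized` at 10A777H; one fails: `seg4_Fail` at 10A914H. The only store is the return address of the check calls (`RA - 160`). -/
theorem seg4_head (Lay : Layout) (hLay : Lay.hi = 0x1000000) (μ : Microarch) (hμ : UserX.MicroOK μ) (u₀ : State)
    (hcode : HasCodeNat Lay u₀ Gif.L.DGifSlurp.entry Gif.Code.code_DGifSlurp.nat Gif.L.DGifSlurp.size)
    (h_load8 : Asan.SmallCheck Lay μ ProgX.Base.WayInv (ProgX.Base.CodeOK u₀) [.rax, .rcx, .rdx] 8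
      ProgX.Base.L.__asan_load8_noabort.entry)
    (h_load4 : Asan.SmallCheck Lay μ ProgX.Base.WayInv (ProgX.Base.CodeOK u₀) [.rax, .rcx, .rdx] 4
      ProgX.Base.L.__asan_load4_noabort.entry)
    (H : Heap) (rest : List Obj) (frames : List (Nat × FrameLayout)) (F : Forest) (R : Rd) (Hc : Heap) (Fc : Forest) (m : Nat)
    (e : State) (ret : Word) (v : State)
    (hat : DGifSlurp.IM H rest frames F R Hc Fc m u₀ e ret v) :
    ReachVia Lay μ ProgX.Base.WayInv v (fun w =>
      DGifSlurp.Sized H rest frames F R Hc Fc m u₀ e ret w ∨ seg4_Fail H rest frames F R Hc Fc u₀ e ret w) := by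
  -- THE PRELUDE: the entry assertion `IM` = `At` + `LZOK` + the last counted image + the measure
  obtain ⟨hA, hlz, ⟨s, init, g, hlast, hnor⟩, hlt⟩ := hat
  have hA0 := hA
  obtain ⟨hcore, hreg, hgif, hpv, hinv, hok⟩ := hA
  have he := hcore.entry
  v_entry he
  obtain ⟨henv, hrdi, hcomp⟩ := hcore.pre
  -- what the walker reads of the segment's entry state
  have w_rip := hcore.rip
  have c_rsp : v.reg .rsp = e.reg .rsp - 152 := hcore.rsp
  have c_rbp : v.reg .rbp = e.reg .rdi := hcore.rbp
  have w_kept : RegsKept [.rsp] v v := RegsKept.refl _ _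
  have w_eq : Mem.EqOn ProgX.Base.L.textLo ProgX.Base.L.textHi u₀.mem v.mem := ProgX.Base.conv_code_eqOn hcore.code
  have hdf := (show abiInv _ from hcore.abi).1
  have hmx := (show abiInv _ from hcore.abi).2
  have hsse := ProgX.Base.sseOK_of_abiInv hcore.abi
  -- where the cursor, gif and pv are, as numbers
  have hcur := henv.ctx.cursor_range henv.heap.inv.shadow
  have hbase : Hc.base = 0x800000 := hreg.1.trans henv.heap.base
  have hgin := hok.owns.inside hinv.heap (o := (Fc.gif, 120)) List.mem_cons_self
  simp only at hgin
  rw [hbase, hgif] at hgin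
  have hg1 := hgin.1
  have hg2 := hgin.2.2.2.2
  clear hgin
  have hpin := hok.owns.inside hinv.heap (o := (Fc.pv, 24936)) (List.mem_cons_of_mem _ List.mem_cons_self)
  simp only at hpin
  rw [hbase, hpv] at hpin
  have hp1 := hpin.1
  have hp2 := hpin.2.2.2.2
  clear hpin
  -- THE ARRAY (SV2): `gif.SavedImages = s.arr`, `gif.ImageCount = init.length + 1 ≤ s.cap`, the object `(s.arr, 56 · s.cap)` is owned
  have hsv := hok.shape.saved
  rw [hlast.saved] at hsv
  obtain ⟨hsv1, hsv2, hsv3, hsv4, hsv5⟩ := hsv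
  rw [hlast.imgs, List.length_append, List.length_singleton] at hsv2 hsv3
  have harr_mem : (s.arr, 56 * s.cap) ∈ Fc.owned := by
    unfold Forest.owned
    rw [hlast.saved]
    simp only [Saved.objs, List.mem_cons, List.mem_append, true_or, or_true]
  have hain := hok.owns.inside hinv.heap harr_mem
  simp only at hain
  rw [hbase] at hain
  have ha1 := hain.1
  have ha2 := hain.2.2.2.2
  clear hain
  -- the two fields of gif the segment loads, in the walker's form
  have l_saved : v.mem.readLE (e.reg .rdi + 0x48) 8 = s.arr := by
    rw [rd_eq_readLE v.mem _ (Fc.gif + 72) 8 (by u_omega)]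
    simp only [gfield] at hsv1
    exact hsv1
  have l_count : v.mem.readLE (e.reg .rdi + 0x20) 4 = init.length + 1 := by
    rw [rd_eq_readLE v.mem _ (Fc.gif + 32) 4 (by u_omega)]
    simp only [gfield] at hsv2
    exact hsv2
  -- `ImageCount` is a small `int` (SV5): `movsxd rdx, [rbp + 20H]` is the number itself
  have hn31 : init.length + 1 < 2 ^ 31 := by omega
  -- gif and the array are live under the body's frames: what the four check goals ask
  have hgl : LiveIn (Hc.liveObjs ++ rest) (DGifSlurp.framesIn frames e) Fc.gif 120 :=
    hok.gif_live.liveIn rest _ (Nat.le_refl _) (Nat.le_refl _)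
  have hal : LiveIn (Hc.liveObjs ++ rest) (DGifSlurp.framesIn frames e) s.arr (56 * s.cap) :=
    (hok.owns.live _ harr_mem).liveIn rest _ (Nat.le_refl _) (Nat.le_refl _)
  clear he_align
  -- THE FIRST WALK, 10A70BH … 10A73AH (chk5): `r12 = sp`, `rdi = &sp->ImageDesc.Width`
  u_walk hcode [hμ.vendor, Gif.Spec.cnt32_sext_bv (init.length + 1) hn31] until [Gif.L.DGifSlurp.chk5]
    span [ProgX.Base.L.textLo, ProgX.Base.L.textHi] side (v_side)
  case check_10a70f =>
    -- dgif_lib.c:1207 the load of `gif.SavedImages`: 8 bytes inside gif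
    have hun : ShadowUntouched v.mem s_10a70f.mem := by v_untouched
    exact hgl.accSmall hinv.shadow hun _ 8 (by decide) (by u_omega) (by u_omega)
  case check_10a71c =>
    -- dgif_lib.c:1207 the load of `gif.ImageCount`: 4 bytes inside gif
    have hun : ShadowUntouched v.mem s_10a71c.mem := by v_untouched
    exact hgl.accSmall hinv.shadow hun _ 4 (by decide) (by u_omega) (by u_omega)
  -- 10A73AH: `sp = &SavedImages[ImageCount - 1]` as a word `p` with its number
  obtain ⟨p, hp⟩ : ∃ p : Word, p = UInt64.ofNat s.arr +
      (UInt64.ofNat (init.length + 1) * 8 - UInt64.ofNat (init.length + 1)) * 8 - 56 := ⟨_, rfl⟩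
  have hpn : p.toNat = s.arr + 56 * init.length := by
    rw [hp]
    exact seg4_slot_toNat _ _ (by omega)
  rw [seg4_slot_add8, ← hp] at w_rdi
  rw [← hp] at w_r12
  clear hp
  -- `sp->ImageDesc.Width` and `->Height` as numbers `W`, `Hh`
  obtain ⟨W, l_w⟩ : ∃ W, v.mem.readLE (p + 8) 4 = W := ⟨_, rfl⟩
  obtain ⟨Hh, l_h⟩ : ∃ Hh, v.mem.readLE (p + 12) 4 = Hh := ⟨_, rfl⟩
  have hW : W < 2 ^ 32 := by
    rw [← l_w]
    exact Mem.readLE_lt v.mem (p + 8) 4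
  have hH : Hh < 2 ^ 32 := by
    rw [← l_h]
    exact Mem.readLE_lt v.mem (p + 12) 4
  have hWd : ∀ M : Mem, M.readLE (p + 8) 4 = W → SavedImage.ImageDesc.Width M p.toNat = W := by
    intro M hM
    simp only [gfield]
    rw [← rd_eq_readLE M (p + 8) (p.toNat + 8) 4 (by u_omega)]
    exact hM
  have hHd : ∀ M : Mem, M.readLE (p + 12) 4 = Hh → SavedImage.ImageDesc.Height M p.toNat = Hh := by
    intro M hM
    simp only [gfield]
    rw [← rd_eq_readLE M (p + 12) (p.toNat + 12) 4 (by u_omega)]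
    exact hM
  -- THE SECOND WALK, 10A73AH … 10A777H | 10A914H
  u_walk hcode [hμ.vendor] until [Gif.L.DGifSlurp.at_10a777, seg4_failAddr]
    span [ProgX.Base.L.textLo, ProgX.Base.L.textHi] side (v_side)
  case check_10a73a =>
    -- dgif_lib.c:1209 the load of `sp->ImageDesc.Width`: 4 bytes inside the array's last counted slot
    have hun : ShadowUntouched v.mem s_10a73a.mem := by v_untouched
    exact hal.accSmall hinv.shadow hun _ 4 (by decide) (by u_omega) (by u_omega)
  case check_10a751 =>
    -- dgif_lib.c:1210 the load of `sp->ImageDesc.Height`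
    have hun : ShadowUntouched v.mem s_10a751.mem := by v_untouched
    exact hal.accSmall hinv.shadow hun _ 4 (by decide) (by u_omega) (by u_omega)
  case side_nofault =>
    -- dgif_lib.c:1212 `INT_MAX / Height`: the divisor is a positive `int`
    exact seg4_nofault Hh hH hbr_10a75d hopt1
  · -- 10A914H FROM 10A746H: `Width <= 0`
    have habi : (conv u₀).inv s_10a746 := by
      refine ProgX.Base.abiInv_of ?_ ?_
      · rw [w_flags]
        simp only [X86.User.df_setStatus]
        exact w_df_10a73a
      · rw [w_mxcsr]
        exact hmx
    obtain ⟨hA1, _⟩ := seg4_at_carry Lay hLay 1091391 hA0 w_rip w_rsp (w_kept.get .rbp rfl) (w_kept.get .r14 rfl) w_mem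
      (ProgX.Base.conv_code_in w_eq) habi
    exact ReachVia.done (Or.inr ⟨hA1, s, init, g, hlast⟩)
  · -- 10A914H FROM 10A75DH: `Height <= 0`
    have habi : (conv u₀).inv s_10a75d := by
      refine ProgX.Base.abiInv_of ?_ ?_
      · rw [w_flags]
        simp only [X86.User.df_setStatus]
        exact w_df_10a751
      · rw [w_mxcsr]
        exact hmx
    obtain ⟨hA1, _⟩ := seg4_at_carry Lay hLay 1091414 hA0 w_rip w_rsp (w_kept.get .rbp rfl) (w_kept.get .r14 rfl) w_mem
      (ProgX.Base.conv_code_in w_eq) habi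
    exact ReachVia.done (Or.inr ⟨hA1, s, init, g, hlast⟩)
  · -- 10A914H FROM 10A771H: `Width > INT_MAX / Height`
    have habi : (conv u₀).inv s_10a771 := by
      refine ProgX.Base.abiInv_of ?_ ?_
      · rw [w_flags]
        simp only [X86.User.df_setStatus]
        exact w_df_10a751
      · rw [w_mxcsr]
        exact hmx
    obtain ⟨hA1, _⟩ := seg4_at_carry Lay hLay 1091414 hA0 w_rip w_rsp (w_kept.get .rbp rfl) (w_kept.get .r14 rfl) w_mem
      (ProgX.Base.conv_code_in w_eq) habi
    exact ReachVia.done (Or.inr ⟨hA1, s, init, g, hlast⟩)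
  · -- 10A777H: THE THREE TESTS PASSED
    have habi : (conv u₀).inv s_10a771 := by
      refine ProgX.Base.abiInv_of ?_ ?_
      · rw [w_flags]
        simp only [X86.User.df_setStatus]
        exact w_df_10a751
      · rw [w_mxcsr]
        exact hmx
    obtain ⟨hA1, hrem1⟩ := seg4_at_carry Lay hLay 1091414 hA0 w_rip w_rsp (w_kept.get .rbp rfl) (w_kept.get .r14 rfl) w_mem
      (ProgX.Base.conv_code_in w_eq) habi
    -- the three tests as numbers
    obtain ⟨hw1, hw31, _, _, _⟩ := seg4_pos W hW hbr_10a746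
    obtain ⟨hh1, hh31, _, _, _⟩ := seg4_pos Hh hH hbr_10a75d
    have hsz := seg4_size W Hh hW hH hbr_10a746 hbr_10a75d qr_10a76d hopt_10a76d hbr_10a771
    -- the two fields through the stack store
    have hWs : SavedImage.ImageDesc.Width s_10a771.mem p.toNat = W := by
      apply hWd
      rw [w_mem]
      u_frame l_w
    have hHs : SavedImage.ImageDesc.Height s_10a771.mem p.toNat = Hh := by
      apply hHd
      rw [w_mem]
      u_frame l_h
    -- `LZOK` reads `[pv + 8, pv + 48)`: not the stack
    have hlz1 : LZOK s_10a771.mem F.pv := by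
      apply hlz.frame _ (by omega)
      rw [w_mem]
      exact Mem.EqOn.writeLE _ _ _ _ _ _ (by u_omega) (Or.inl (by u_omega))
    refine ReachVia.done (Or.inl ?_)
    exact {
      at_ := hA1
      lz := hlz1
      last := by
        refine ⟨s, init, g, hlast, hnor, ?_⟩
        rw [w_r12]
        exact hpn
      rbx := by
        rw [w_rbx, w_r12, hWs]
        exact toNat_ofBV_ofNat32 W hW
      rcx := by
        rw [w_rcx, w_r12, hHs]
        exact toNat_ofBV_ofNat32 Hh hH
      w_pos := by
        rw [w_r12, hWs]
        exact hw1
      h_pos := by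
        rw [w_r12, hHs]
        exact hh1
      size := by
        rw [w_r12, hWs, hHs]
        exact hsz
      lt := by
        rw [hrem1]
        exact hlt
    }

/-- **`Env` AT THE ENTRY OF A CALLEE, FOR THE PRESENT HEAP AND FOREST** (`Env.at_call` of Gif/Spec/FrameCarry.lean with the ghosts
that change): `henv` is the ENTRY's environment (for `Hc`'s place through `SameRegion`, the text clauses, the context and where the
cursor is), `hinv` / `hok` the body's invariants for `Hc`, `Fc` at a memory `mem`; the callee's entry state `s` differs from `mem` by
stack stores below `top`. -/
theorem seg4_env_at_call {H Hc : Heap} {rest : List Obj} {frames : List (Nat × FrameLayout)} {F Fc : Forest} {R : Rd}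
    {e s : State} {base top lo : Nat} {Fl : FrameLayout} {mem : Mem} (henv : Env H rest frames F R e) (hreg : SameRegion H Hc)
    (hinv : HeapInv Hc rest ((base, Fl) :: frames) top mem) (hok : GifOK Hc Fc R mem)
    (hs : Mem.SameExcept [⟨lo, top⟩] mem s.mem) (hlo : 0x700000 ≤ lo) (htop : top ≤ (e.reg .rsp).toNat + 8)
    (hsp : (s.reg .rsp).toNat + 8 ≤ top) (h8 : (s.reg .rsp).toNat % 8 = 0) (hlo' : 0x700000 ≤ (s.reg .rsp).toNat + 8) :
    Env Hc rest ((base, Fl) :: frames) Fc R s := by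
  have hcur := henv.ctx.cursor_range henv.heap.inv.shadow
  have hhi := hinv.shadow.stack.hi
  have hoff := hinv.heap.offStack
  have hroom := hinv.heap.room
  have hun : ShadowUntouched mem s.mem := by
    apply hs.eqOn
    intro w hw
    have e := List.mem_singleton.mp hw
    rw [e]
    simp only
    omega
  have hinv' : HeapInv Hc rest ((base, Fl) :: frames) ((s.reg .rsp).toNat + 8) s.mem := by
    refine (hinv.sameExcept hun hs ?_).lower hsp (by omega) hlo'
    intro w hw
    have e := List.mem_singleton.mp hw
    rw [e]
    left
    simp only
    omega
  refine ⟨⟨hinv', hreg.1.trans henv.heap.base, hreg.2.trans henv.heap.limit, henv.heap.text, henv.heap.offText⟩,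
    henv.ctx.push base Fl, ?_⟩
  apply hok.sameExcept hinv.heap ⟨hcur.1, hcur.2.1⟩ hs
  intro w hw
  have e := List.mem_singleton.mp hw
  rw [e]
  apply Loose.stack hinv.heap
  · simp only
    omega
  · simp only
    omega
  · simp only
    omega

/-- **10A914H … the call of DGifDecreaseImageCounter … 10A8EDH** (dgif_lib.c:1213-1214): `DGifDecreaseImageCounter(GifFile)` drops the
last counted image (the one without raster: every image that is left is complete), `ebx = 0` (`return GIF_ERROR`), to the epilogue. -/
theorem seg4_tail (Lay : Layout) (hLay : Lay.hi = 0x1000000) (μ : Microarch) (hμ : UserX.MicroOK μ) (u₀ : State)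
    (hcode : HasCodeNat Lay u₀ Gif.L.DGifSlurp.entry Gif.Code.code_DGifSlurp.nat Gif.L.DGifSlurp.size)
    (h_dec : ∀ (H : Heap) (rest : List Obj) (frames : List (Nat × FrameLayout)) (F : Forest) (R : Rd) (init : List Img) (g : Img),
      Calls Lay μ ProgX.Base.WayInv (ProgX.Base.conv u₀) Gif.L.DGifDecreaseImageCounter.entry
        (Gif.Spec.DGifDecreaseImageCounter.spec H rest frames F R init g))
    (H : Heap) (rest : List Obj) (frames : List (Nat × FrameLayout)) (F : Forest) (R : Rd) (Hc : Heap) (Fc : Forest)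
    (e : State) (ret : Word) (v : State)
    (hat : seg4_Fail H rest frames F R Hc Fc u₀ e ret v) :
    ReachVia Lay μ ProgX.Base.WayInv v (DGifSlurp.Exit H rest frames F R u₀ e ret) := by
  -- THE PRELUDE
  obtain ⟨hA, s, init, g, hlast⟩ := hat
  obtain ⟨hcore, hreg, hgif, hpv, hinv, hok⟩ := hA
  have he := hcore.entry
  v_entry he
  obtain ⟨henv, hrdi, hcomp⟩ := hcore.pre
  have w_rip : v.rip = seg4_failAddr := hcore.rip
  have c_rsp : v.reg .rsp = e.reg .rsp - 152 := hcore.rsp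
  have c_rbp : v.reg .rbp = e.reg .rdi := hcore.rbp
  have w_kept : RegsKept [.rsp] v v := RegsKept.refl _ _
  have w_eq : Mem.EqOn ProgX.Base.L.textLo ProgX.Base.L.textHi u₀.mem v.mem := ProgX.Base.conv_code_eqOn hcore.code
  have hdf := (show abiInv _ from hcore.abi).1
  have hmx := (show abiInv _ from hcore.abi).2
  have hsse := ProgX.Base.sseOK_of_abiInv hcore.abi
  -- the slots and the footprint that `Core` at the exit states again
  have k_r15 : v.mem.readLE (e.reg .rsp - 8) 8 = (e.reg .r15).toNat := hcore.slot_r15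
  have k_r14 : v.mem.readLE (e.reg .rsp - 16) 8 = (e.reg .r14).toNat := hcore.slot_r14
  have k_r13 : v.mem.readLE (e.reg .rsp - 24) 8 = (e.reg .r13).toNat := hcore.slot_r13
  have k_r12 : v.mem.readLE (e.reg .rsp - 32) 8 = (e.reg .r12).toNat := hcore.slot_r12
  have k_rbp : v.mem.readLE (e.reg .rsp - 40) 8 = (e.reg .rbp).toNat := hcore.slot_rbp
  have k_rbx : v.mem.readLE (e.reg .rsp - 48) 8 = (e.reg .rbx).toNat := hcore.slot_rbx
  have k_ra : UInt64.ofNat (v.mem.readLE (e.reg .rsp) 8) = ret := hcore.slot_ra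
  have hsame : Mem.SameExcept
    [⟨(e.reg .rsp).toNat - 848, (e.reg .rsp).toNat⟩,
     shadowSpan ((e.reg .rsp).toNat - 152) ((e.reg .rsp).toNat - 56),
     ⟨0x800000, 0x1000020⟩,
     ⟨R.cur, R.cur + 8⟩] e.mem v.mem := hcore.same
  have hcur := henv.ctx.cursor_range henv.heap.inv.shadow
  -- the callee's contract for the present heap and forest, the own frame in front, the last image `g`
  have hdec := h_dec Hc rest (DGifSlurp.framesIn frames e) Fc R init g
  -- THE WALK, to the call's return address
  u_walk hcode [hμ.vendor] until [Gif.L.DGifSlurp.ret23] span [ProgX.Base.L.textLo, ProgX.Base.L.textHi] side (v_side)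
  case call_inv =>
    v_inv
  case pre_10a917 =>
    -- THE CALLEE'S PRECONDITION. The environment for the present heap and forest, the own frame in front: only the return
    -- address was pushed since `v`
    have hs : Mem.SameExcept [⟨(e.reg .rsp).toNat - 848, (e.reg .rsp).toNat - 152⟩] v.mem s_10a917.mem := by
      rw [w_mem]
      u_same
    have henv' : Env Hc rest (DGifSlurp.framesIn frames e) Fc R s_10a917 := by
      refine seg4_env_at_call henv hreg hinv hok hs (by omega) (by omega) ?_ ?_ ?_
      · rw [w_rsp]
        u_omega
      · rw [w_rsp]
        u_omega
      · rw [w_rsp]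
        u_omega
    -- `rdi = gif`, the counted images `init ++ [g]`, the last without extension list (EX3)
    refine ⟨henv', ?_, ?_, hlast.noext⟩
    · rw [w_rdi, hgif]
      exact hrdi
    · unfold Forest.imgs
      rw [hlast.saved]
      exact hlast.imgs
  -- 10A91CH (ret23): DGifDecreaseImageCounter HAS RETURNED. Its post: a heap `H'`, a forest `F'` whose counted images are `init`
  obtain ⟨H', F', hback, hsb, himgs, hremeq⟩ := w_post
  have e_top : (s_10a917.reg .rsp).toNat + 8 = (e.reg .rsp).toNat - 152 := by
    rw [w_rsp_10a917]
    u_omega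
  -- the reader at the callee's entry is `v`'s: only the return address was pushed
  have hs0 : Mem.SameExcept [⟨(e.reg .rsp).toNat - 848, (e.reg .rsp).toNat - 152⟩] v.mem s_10a917.mem := by
    rw [w_mem_10a917]
    u_same
  have hrem0 : rem R s_10a917.mem = rem R v.mem := by
    apply rem_sameExcept hs0 (by omega)
    intro w hw
    have e := List.mem_singleton.mp hw
    rw [e]
    simp only
    omega
  -- the callee's footprint in terms of `v`
  v_after_call w_rsp_10a917 w_mem_10a917
  -- THE SLOTS AND THE RETURN ADDRESS, over the pushed return address (first step) and through the callee's footprint (second step)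
  have hp15 : s_10a917.mem.readLE (e.reg .rsp - 8) 8 = (e.reg .r15).toNat := by
    rw [w_mem_10a917]
    u_frame k_r15
  rw [w_mem_10a917] at hp15
  have hs15 : s_10a917r.mem.readLE (e.reg .rsp - 8) 8 = (e.reg .r15).toNat := by u_frame hp15
  have hp14 : s_10a917.mem.readLE (e.reg .rsp - 16) 8 = (e.reg .r14).toNat := by
    rw [w_mem_10a917]
    u_frame k_r14
  rw [w_mem_10a917] at hp14
  have hs14 : s_10a917r.mem.readLE (e.reg .rsp - 16) 8 = (e.reg .r14).toNat := by u_frame hp14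
  have hp13 : s_10a917.mem.readLE (e.reg .rsp - 24) 8 = (e.reg .r13).toNat := by
    rw [w_mem_10a917]
    u_frame k_r13
  rw [w_mem_10a917] at hp13
  have hs13 : s_10a917r.mem.readLE (e.reg .rsp - 24) 8 = (e.reg .r13).toNat := by u_frame hp13
  have hp12 : s_10a917.mem.readLE (e.reg .rsp - 32) 8 = (e.reg .r12).toNat := by
    rw [w_mem_10a917]
    u_frame k_r12
  rw [w_mem_10a917] at hp12
  have hs12 : s_10a917r.mem.readLE (e.reg .rsp - 32) 8 = (e.reg .r12).toNat := by u_frame hp12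
  have hpbp : s_10a917.mem.readLE (e.reg .rsp - 40) 8 = (e.reg .rbp).toNat := by
    rw [w_mem_10a917]
    u_frame k_rbp
  rw [w_mem_10a917] at hpbp
  have hsbp : s_10a917r.mem.readLE (e.reg .rsp - 40) 8 = (e.reg .rbp).toNat := by u_frame hpbp
  have hpbx : s_10a917.mem.readLE (e.reg .rsp - 48) 8 = (e.reg .rbx).toNat := by
    rw [w_mem_10a917]
    u_frame k_rbx
  rw [w_mem_10a917] at hpbx
  have hsbx : s_10a917r.mem.readLE (e.reg .rsp - 48) 8 = (e.reg .rbx).toNat := by u_frame hpbx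
  have hpra : UInt64.ofNat (s_10a917.mem.readLE (e.reg .rsp) 8) = ret := by
    rw [w_mem_10a917]
    u_frame k_ra
  rw [w_mem_10a917] at hpra
  have hsra : UInt64.ofNat (s_10a917r.mem.readLE (e.reg .rsp) 8) = ret := by u_frame hpra
  -- the footprint since the entry: the callee's windows lie inside the function's
  have hsame1 : Mem.SameExcept
    [⟨(e.reg .rsp).toNat - 848, (e.reg .rsp).toNat⟩,
     shadowSpan ((e.reg .rsp).toNat - 152) ((e.reg .rsp).toNat - 56),
     ⟨0x800000, 0x1000020⟩,
     ⟨R.cur, R.cur + 8⟩] e.mem s_10a917r.mem := by u_same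
  -- the heap's invariant comes back with the clean stack at the callee's `rsp + 8` = the body's `rsp`
  have hinv1 : HeapInv H' rest (DGifSlurp.framesIn frames e) ((e.reg .rsp).toNat - 152) s_10a917r.mem := by
    rw [← e_top]
    exact hback.inv
  have hrem1 : rem R s_10a917r.mem ≤ rem R e.mem := by
    rw [hremeq, hrem0]
    exact hcore.rem
  -- every image that is left is complete: `F'.imgs = init`
  have hcomplete : F'.Complete := by
    rw [DGifSlurp.complete_iff_imgs, himgs]
    exact hlast.done
  have c_rbp1 : s_10a917r.reg .rbp = e.reg .rdi := (w_kept.get .rbp rfl).trans c_rbp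
  have c_r14 : s_10a917r.reg .r14 = (e.reg .rsp - 152) >>> 3 := (w_kept.get .r14 rfl).trans hcore.r14
  clear w_same hp15 hp14 hp13 hp12 hpbp hpbx hpra
  -- THE SECOND WALK: `mov ebx, 0 ; jmp 10A8EDH`
  have habi0 : abiInv s_10a917r := w_inv
  u_walk hcode [hμ.vendor] until [Gif.L.DGifSlurp.at_10a8ed] span [ProgX.Base.L.textLo, ProgX.Base.L.textHi] side (v_side)
  -- 10A8EDH: THE EXIT ASSERTION `Done` for the callee's heap and forest
  refine ReachVia.done ⟨H', F', ?_, hcomplete⟩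
  exact {
    core := {
      entry := hcore.entry
      pre := hcore.pre
      rip := w_rip
      rsp := w_rsp
      rbp := (w_kept.get .rbp rfl).trans c_rbp
      r14 := (w_kept.get .r14 rfl).trans hcore.r14
      slot_r15 := by
        rw [w_mem]
        exact hs15
      slot_r14 := by
        rw [w_mem]
        exact hs14
      slot_r13 := by
        rw [w_mem]
        exact hs13
      slot_r12 := by
        rw [w_mem]
        exact hs12
      slot_rbp := by
        rw [w_mem]
        exact hsbp
      slot_rbx := by
        rw [w_mem]
        exact hsbx
      slot_ra := by
        rw [w_mem]
        exact hsra
      rem := by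
        rw [w_mem]
        exact hrem1
      same := by
        rw [w_mem]
        exact hsame1
      code := ProgX.Base.conv_code_in w_eq
      abi := by
        refine ProgX.Base.abiInv_of ?_ ?_
        · rw [w_flags]
          exact habi0.1
        · rw [w_mxcsr]
          exact habi0.2
    }
    region := hreg.trans hback.region
    gif := hsb.1.trans hgif
    pv := hsb.2.1.trans hpv
    inv := by
      rw [w_mem]
      exact hinv1
    ok := by
      rw [w_mem]
      exact hback.ok
  }

end Gif.Spec.DGifSlurp_4
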